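-- pv_equiv track=rewrite | github.com/Armandolando/Twitter-Reddit-Comparison | topic_modeling/predict_topic.py | naive_scores
-- ===== SOURCE A (Python) =====
-- def naive_scores(topics, comment):
--     """
--     Generate a list of scores, whose indexes reflect the alphabetical order of the topics
--     The scores are just counters of how many times the keywords of a topic appear in a comment
--     :param topics: data structure created by 'get_topics' function
--     :param comment: list of words composing a comment (eventually pre processed)
--     :return: list of scores of one comment
--     """
--     topics_names = list(topics.keys())
--     topics_names.sort()
--     scores = [0 for _ in topics_names]
--     for i, name in enumerate(topics_names):
--         for word in comment:
--             if word in list(topics[name].keys()):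
--                 scores[i] += 1
--     return scores
-- ===== SOURCE B (Python) =====
-- def naive_scores(topics, comment):
--     """Count keyword occurrences per topic via a word-frequency table built in one
--     pass over the comment, then sum the counts of each topic's keywords."""
--     counts = {}
--     for word in comment:
--         counts[word] = counts.get(word, 0) + 1
--     return [sum(counts.get(kw, 0) for kw in topics[name]) for name in sorted(topics)]
-- ===== Notes on version B (the rewrite author's own statement) =====
-- stated objective: faster
-- what changed: B builds a word-frequency dictionary of the comment once and, per sorted topic, sums the precomputed counts of its keywords, instead of rescanning the whole comment and rebuilding the keyword list for a membership test on every (topic, word) pair.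
import Mathlib
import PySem

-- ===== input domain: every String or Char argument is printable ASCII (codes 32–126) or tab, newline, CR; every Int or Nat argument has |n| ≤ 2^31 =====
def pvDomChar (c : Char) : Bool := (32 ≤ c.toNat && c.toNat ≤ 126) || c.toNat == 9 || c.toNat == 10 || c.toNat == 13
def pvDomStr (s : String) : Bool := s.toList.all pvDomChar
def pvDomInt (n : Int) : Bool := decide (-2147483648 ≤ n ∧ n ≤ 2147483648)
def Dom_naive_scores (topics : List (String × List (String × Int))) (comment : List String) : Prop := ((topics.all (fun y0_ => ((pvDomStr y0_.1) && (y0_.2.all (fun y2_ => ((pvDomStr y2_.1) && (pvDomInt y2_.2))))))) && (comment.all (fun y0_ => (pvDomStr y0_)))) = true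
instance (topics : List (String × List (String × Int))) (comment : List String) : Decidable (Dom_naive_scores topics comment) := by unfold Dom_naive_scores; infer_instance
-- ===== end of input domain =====

-- B replaces A's per-topic rescans of the comment by one word-frequency dictionary
-- built in a single pass over the comment, summing precomputed counts per topic (objective: faster).


-- ===== PORT A =====
def naive_scores (topics : List (String × List (String × Int))) (comment : List String) : List Int :=
  let t := PySem.Dict.mk topics
  let topics_names := PySem.List.sorted (PySem.Dict.keys t) (fun x => x) false
  let scores : List Int := topics_names.map (fun _ => 0)
  (PySem.List.enumerate topics_names 0).foldl
    (fun scores p =>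
      comment.foldl
        (fun scores word =>
          if (PySem.Dict.keys (PySem.Dict.mk (PySem.Dict.getD t p.2 []))).contains word then
            PySem.List.pySetD scores p.1 (PySem.List.pyGetD scores p.1 0 + 1)
          else scores)
        scores)
    scores

-- ===== PORT B =====
def naive_scores_alt (topics : List (String × List (String × Int))) (comment : List String) : List Int :=
  let t := PySem.Dict.mk topics
  let counts := comment.foldl (fun d w => d.insert w (d.getD w 0 + 1)) PySem.Dict.empty
  (PySem.List.sorted (PySem.Dict.keys t) (fun x => x) false).map
    (fun name =>
      (PySem.Dict.keys (PySem.Dict.mk (PySem.Dict.getD t name []))).foldl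
        (fun acc kw => acc + counts.getD kw 0) 0)

-- ===== PRECONDITION & SPEC =====
-- Pre_ excludes association lists with duplicate outer or inner keys: such lists cannot
-- arise from the Python dicts A receives (dict construction collapses duplicate keys).
def Pre_naive_scores (topics : List (String × List (String × Int))) (comment : List String) : Prop :=
  (topics.map (·.1)).Nodup ∧ ∀ p ∈ topics, (p.2.map (·.1)).Nodup
instance (topics : List (String × List (String × Int))) (comment : List String) : Decidable (Pre_naive_scores topics comment) := by unfold Pre_naive_scores; infer_instance
def pvWitness_naive_scores : (List (String × List (String × Int))) × List String :=
  ([("b", [("x", 1), ("y", 2)]), ("a", [("x", 0)])], ["x", "z", "x"])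

def Spec_naive_scores (topics : List (String × List (String × Int))) (comment : List String) (out : List Int) : Prop := out = naive_scores_alt topics comment
instance (topics : List (String × List (String × Int))) (comment : List String) (out : List Int) : Decidable (Spec_naive_scores topics comment out) := by unfold Spec_naive_scores; infer_instance

-- ===== CLAIM (what is proved, stated in full; the proofs are below) =====
def Claim_equal_naive_scores : Prop := ∀ (topics : List (String × List (String × Int))) (comment : List String), Dom_naive_scores topics comment → Pre_naive_scores topics comment → Spec_naive_scores topics comment (naive_scores topics comment)

-- ===== LEMMAS AND PROOFS =====

-- A's inner loop over the comment adds the matching-word count at position k.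
lemma inner_loop_eq (q : String → Bool) (comment : List String) :
    ∀ (s : List Int) (k : Nat),
      comment.foldl (fun s w => if q w then s.set k (s.getD k 0 + 1) else s) s
        = s.set k (s.getD k 0 + (comment.countP q : Int)) := by
  induction comment with
  | nil =>
    intro s k
    by_cases hk : k < s.length
    · rw [List.foldl_nil, List.countP_nil, Nat.cast_zero, add_zero,
          List.getD_eq_getElem s 0 hk, List.set_getElem_self hk]
    · rw [not_lt] at hk
      simp [List.set_eq_of_length_le hk]
  | cons w c ih =>
    intro s k
    simp only [List.foldl_cons, List.countP_cons]
    by_cases hw : q w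
    · rw [if_pos hw, ih]
      by_cases hk : k < s.length
      · have hg : (s.set k (s.getD k 0 + 1)).getD k 0 = s.getD k 0 + 1 := by
          rw [List.getD_eq_getElem _ _ (by simpa using hk)]
          exact List.getElem_set_self (by simpa using hk)
        rw [hg, List.set_set]
        congr 1
        push_cast [hw]
        simp
        omega
      · rw [not_lt] at hk
        rw [List.set_eq_of_length_le hk, List.set_eq_of_length_le hk,
            List.set_eq_of_length_le hk]
    · rw [if_neg hw, ih]
      simp [hw]

-- A's outer loop fills position k of the zero list with the count for name k.
lemma outer_loop_eq (cnt : String → Int) :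
    ∀ (ns : List String) (pre : List Int),
      (PySem.List.enumerate ns (pre.length : Int)).foldl
          (fun s p => PySem.List.pySetD s p.1 (PySem.List.pyGetD s p.1 0 + cnt p.2)) (pre ++ ns.map (fun _ => 0))
        = pre ++ ns.map cnt := by
  intro ns
  induction ns with
  | nil => intro pre; simp [PySem.List.enumerate]
  | cons x xs ih =>
    intro pre
    rw [PySem.List.enumerate_cons, List.foldl_cons]
    have hget : PySem.List.pyGetD (pre ++ (0 : Int) :: xs.map (fun _ => 0)) (pre.length : Int) 0 = 0 := by
      simp [PySem.List.pyGetD_natCast, List.getD]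
    have hset : PySem.List.pySetD (pre ++ (0 : Int) :: xs.map (fun _ => 0)) (pre.length : Int) (0 + cnt x)
        = (pre ++ [cnt x]) ++ xs.map (fun _ => 0) := by
      have h1 : PySem.List.pySetD (pre ++ (0 : Int) :: xs.map (fun _ => 0)) (pre.length : Int) (0 + cnt x)
          = (pre ++ (0 : Int) :: xs.map (fun _ => 0)).set pre.length (0 + cnt x) := by
        simp [pysem]
      rw [h1]
      rw [show pre.length = pre.length + 0 from rfl, List.set_append_right _ _ (Nat.le_add_right _ _)]
      simp
    simp only [List.map_cons] at hget hset ⊢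
    rw [hget, hset]
    have hlen : (pre.length : Int) + 1 = ((pre ++ [cnt x]).length : Int) := by simp
    rw [hlen, ih (pre ++ [cnt x])]
    simp

-- summing multiplicities of distinct keywords = counting matching words
lemma sum_counts_eq_countP (comment : List String) :
    ∀ (K : List String), K.Nodup →
      (K.map (fun kw => (List.count kw comment : Int))).sum
        = (comment.countP (fun w => K.contains w) : Int) := by
  induction comment with
  | nil => intro K _; simp
  | cons w c ih =>
    intro K hK
    have hsplit : (K.map (fun kw => (List.count kw (w :: c) : Int))).sum
        = (K.map (fun kw => (List.count kw c : Int))).sum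
          + (K.map (fun kw => if kw == w then (1 : Int) else 0)).sum := by
      rw [← PySem.List.sum_map_add_int]
      congr 1
      apply List.map_congr_left
      intro kw _
      rw [List.count_cons]
      push_cast
      rw [Bool.beq_comm]
    rw [hsplit, ih K hK, PySem.List.sum_map_ite_one_zero (fun kw => kw == w) K,
        List.countP_cons]
    have hcnt : List.countP (fun kw => kw == w) K = List.count w K := by
      simp [List.count]
    rw [hcnt]
    push_cast
    by_cases hw : w ∈ K
    · rw [List.count_eq_one_of_mem hK hw]
      simp [hw]
    · rw [List.count_eq_zero_of_not_mem hw]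
      simp [hw]

-- inner loop restated with the Python indexing primitives of port A
lemma inner_loop_py (q : String → Bool) (comment : List String) (s : List Int) (k : Nat) :
    comment.foldl (fun s w => if q w then PySem.List.pySetD s (k : Int) (PySem.List.pyGetD s (k : Int) 0 + 1) else s) s
      = PySem.List.pySetD s (k : Int) (PySem.List.pyGetD s (k : Int) 0 + (comment.countP q : Int)) := by
  have hs : ∀ (s : List Int) (v : Int), PySem.List.pySetD s (k : Int) v = s.set k v := by
    intro s v; simp [pysem]
  have hg : ∀ (s : List Int), PySem.List.pyGetD s (k : Int) 0 = s.getD k 0 := by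
    intro s; simp [pysem]
  rw [hs, hg, ← inner_loop_eq q comment s k]
  refine PySem.List.foldl_congr_mem _ _ _ _ ?_
  intro acc w _
  by_cases hqw : q w <;> simp [hqw, hs]

-- looking a topic name up in the dict gives its (unique) entry's keyword list
lemma getD_mk_eq (topics : List (String × List (String × Int)))
    (hnd : (topics.map (·.1)).Nodup) (p : String × List (String × Int)) (hp : p ∈ topics) :
    (PySem.Dict.mk topics).getD p.1 [] = p.2 := by
  refine PySem.Dict.getD_of_mem_items (d := PySem.Dict.mk topics) (k := p.1) (v := p.2) (d0 := []) ?_ ?_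
  · simpa using hp
  · simpa [PySem.Dict.keys] using hnd

-- per-topic: B's sum of precomputed counts = A's count of matching comment words
lemma per_name (topics : List (String × List (String × Int))) (comment : List String)
    (hpre : Pre_naive_scores topics comment) (name : String)
    (hname : name ∈ PySem.Dict.keys (PySem.Dict.mk topics)) :
    ((PySem.Dict.keys (PySem.Dict.mk ((PySem.Dict.mk topics).getD name []))).foldl
        (fun acc kw => acc + (PySem.Dict.counter comment).getD kw 0) 0)
      = (comment.countP
          (fun w => (PySem.Dict.keys (PySem.Dict.mk ((PySem.Dict.mk topics).getD name []))).contains w) : Int) := by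
  obtain ⟨p, hp, rfl⟩ : ∃ p ∈ topics, p.1 = name := by
    simpa [PySem.Dict.keys] using hname
  have hval : (PySem.Dict.mk topics).getD p.1 [] = p.2 := getD_mk_eq topics hpre.1 p hp
  have hKnd : (PySem.Dict.keys (PySem.Dict.mk ((PySem.Dict.mk topics).getD p.1 []))).Nodup := by
    rw [hval]
    simpa [PySem.Dict.keys] using hpre.2 p hp
  rw [PySem.List.foldl_add]
  simp only [PySem.Dict.getD_counter, zero_add]
  exact sum_counts_eq_countP comment _ hKnd

-- ===== VERDICT (by name: the statement is the Claim_ definition above) =====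
theorem naive_scores_spec : Claim_equal_naive_scores := by
  intro topics comment _ hpre
  unfold Spec_naive_scores naive_scores naive_scores_alt
  simp only
  rw [PySem.Dict.foldl_insert_getD_add_one_eq_counter]
  -- A's nested loops compute the per-name counts, placed by index
  have hA : (PySem.List.enumerate (PySem.List.sorted (PySem.Dict.keys (PySem.Dict.mk topics)) (fun x => x) false) 0).foldl
        (fun scores p =>
          comment.foldl
            (fun scores word =>
              if (PySem.Dict.keys (PySem.Dict.mk ((PySem.Dict.mk topics).getD p.2 []))).contains word then
                PySem.List.pySetD scores p.1 (PySem.List.pyGetD scores p.1 0 + 1)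
              else scores)
            scores)
        ((PySem.List.sorted (PySem.Dict.keys (PySem.Dict.mk topics)) (fun x => x) false).map (fun _ => 0))
      = (PySem.List.sorted (PySem.Dict.keys (PySem.Dict.mk topics)) (fun x => x) false).map
          (fun name => (comment.countP
            (fun w => (PySem.Dict.keys (PySem.Dict.mk ((PySem.Dict.mk topics).getD name []))).contains w) : Int)) := by
    rw [PySem.List.foldl_congr_mem _ _
        (fun s p => PySem.List.pySetD s p.1 (PySem.List.pyGetD s p.1 0 +
          (comment.countP
            (fun w => (PySem.Dict.keys (PySem.Dict.mk ((PySem.Dict.mk topics).getD p.2 []))).contains w) : Int))) _ ?_]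
    · simpa using outer_loop_eq
        (fun name => (comment.countP
          (fun w => (PySem.Dict.keys (PySem.Dict.mk ((PySem.Dict.mk topics).getD name []))).contains w) : Int))
        (PySem.List.sorted (PySem.Dict.keys (PySem.Dict.mk topics)) (fun x => x) false) []
    · intro acc p hp
      obtain ⟨k, hk, rfl⟩ := (PySem.List.mem_enumerate_iff _ _ _).1 hp
      simp only [zero_add]
      exact inner_loop_py _ comment acc k
  rw [hA]
  refine List.map_congr_left ?_
  intro name hname
  exact (per_name topics comment hpre name ((PySem.List.mem_sorted _ _ _ _).1 hname)).symm
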